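-- pv_equiv track=rewrite | github.com/alexezh/foolpy | srch/actions.py | apply_cancel
-- ===== SOURCE A (Python) =====
-- def apply_cancel(tokens):
--     # Cancel out same numbers/variables with opposite signs: x + 3 - 3 = x, 5 + x - x = 5
--     # But avoid canceling terms that are part of multiplication operations
--
--     def is_part_of_multiplication(tokens, index):
--         """Check if a term at given index is part of a multiplication"""
--         # Check if previous token is *
--         if index > 0 and tokens[index - 1] == '*':
--             return True
--         # Check if next token is *
--         if index + 1 < len(tokens) and tokens[index + 1] == '*':
--             return True
--         return False
--
--     # Look for addition and subtraction of the same term to cancel out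
--     for i in range(len(tokens)):
--         if tokens[i] == '+' and i + 1 < len(tokens):
--             # Found a + term, check if it's not part of multiplication
--             add_term = tokens[i + 1]
--             if is_part_of_multiplication(tokens, i + 1):
--                 continue
--
--             # Search for corresponding subtraction
--             for j in range(i + 2, len(tokens)):
--                 if (tokens[j] == '-' and
--                     j + 1 < len(tokens) and
--                     tokens[j + 1] == add_term and
--                     not is_part_of_multiplication(tokens, j + 1)):
--
--                     # Found matching + term and - term, cancel them out
--                     # Remove the second occurrence first (higher index)
--                     new_tokens = tokens[:j] + tokens[j+2:]
--                     # Then remove the first occurrence (lower index)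
--                     new_tokens = new_tokens[:i] + new_tokens[i+2:]
--                     return new_tokens
--
--     # Also look for subtraction followed by addition of the same term
--     for i in range(len(tokens)):
--         if tokens[i] == '-' and i + 1 < len(tokens):
--             # Found a - term, check if it's not part of multiplication
--             sub_term = tokens[i + 1]
--             if is_part_of_multiplication(tokens, i + 1):
--                 continue
--
--             # Search for corresponding addition
--             for j in range(i + 2, len(tokens)):
--                 if (tokens[j] == '+' and
--                     j + 1 < len(tokens) and
--                     tokens[j + 1] == sub_term and
--                     not is_part_of_multiplication(tokens, j + 1)):
--
--                     # Found matching - term and + term, cancel them out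
--                     # Remove the second occurrence first (higher index)
--                     new_tokens = tokens[:j] + tokens[j+2:]
--                     # Then remove the first occurrence (lower index)
--                     new_tokens = new_tokens[:i] + new_tokens[i+2:]
--                     return new_tokens
--
--     # Handle case where first term is implicitly positive
--     if len(tokens) >= 3 and not tokens[0] in ['+', '-']:
--         first_term = tokens[0]
--         if not is_part_of_multiplication(tokens, 0):
--             # Look for the same term later with a minus sign
--             for i in range(1, len(tokens)):
--                 if (i + 1 < len(tokens) and
--                     tokens[i] == '-' and
--                     tokens[i + 1] == first_term and
--                     not is_part_of_multiplication(tokens, i + 1)):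
--                     # Cancel out: remove first term and the "- term" pair
--                     new_tokens = tokens[1:i] + tokens[i+2:]
--                     return new_tokens
--
--     return None
-- ===== SOURCE B (Python) =====
-- from bisect import bisect_left
--
-- def apply_cancel(tokens):
--     # Index sign-slot occurrences by term once, then bisect for the earliest
--     # matching opposite occurrence instead of rescanning the list per term.
--     n = len(tokens)
--
--     def mult(k):
--         return (k > 0 and tokens[k - 1] == '*') or (k + 1 < n and tokens[k + 1] == '*')
--
--     plus_occ = []   # ordered (pos, term) for '+' slots not under multiplication
--     minus_occ = []
--     plus_pos = {}   # term -> ascending positions of its '+' slots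
--     minus_pos = {}
--     for p in range(n - 1):
--         if not mult(p + 1):
--             if tokens[p] == '+':
--                 plus_occ.append((p, tokens[p + 1]))
--                 plus_pos.setdefault(tokens[p + 1], []).append(p)
--             elif tokens[p] == '-':
--                 minus_occ.append((p, tokens[p + 1]))
--                 minus_pos.setdefault(tokens[p + 1], []).append(p)
--
--     def cut(i, j):  # drop the sign/term pairs at i and j (i + 2 <= j)
--         return tokens[:i] + tokens[i + 2:j] + tokens[j + 2:]
--
--     for occ, opp in ((plus_occ, minus_pos), (minus_occ, plus_pos)):
--         for i, t in occ:
--             js = opp.get(t, [])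
--             k = bisect_left(js, i + 2)
--             if k < len(js):
--                 return cut(i, js[k])
--
--     if n >= 3 and tokens[0] not in ('+', '-') and not mult(0):
--         js = minus_pos.get(tokens[0], [])
--         if js:
--             j = js[0]
--             return tokens[1:j] + tokens[j + 2:]
--     return None
-- ===== Notes on version B (the rewrite author's own statement) =====
-- stated objective: alternative
-- what changed: A rescans the token list from scratch for every '+'/'-' slot (nested scans, plus a third scan for the implicit leading term); B makes one indexing pass that records, per term, the ascending positions of its '+' and '-' slots, then finds the earliest matching opposite occurrence for each slot by bisection on those position lists.
import Mathlib
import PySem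

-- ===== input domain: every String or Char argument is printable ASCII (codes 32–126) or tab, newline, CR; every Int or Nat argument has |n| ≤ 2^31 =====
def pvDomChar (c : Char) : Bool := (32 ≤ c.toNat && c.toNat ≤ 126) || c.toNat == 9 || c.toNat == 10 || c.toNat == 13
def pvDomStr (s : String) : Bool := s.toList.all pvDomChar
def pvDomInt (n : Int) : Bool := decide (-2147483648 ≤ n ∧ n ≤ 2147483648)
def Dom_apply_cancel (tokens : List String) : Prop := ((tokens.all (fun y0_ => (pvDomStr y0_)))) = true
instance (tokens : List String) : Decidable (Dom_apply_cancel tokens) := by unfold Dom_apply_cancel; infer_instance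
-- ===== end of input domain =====

-- B replaces A's nested rescans with one indexing pass (per-term position lists of '+'/'-'
-- slots) and a bisection for the earliest matching opposite occurrence (alternative algorithm).

-- ===== PORT A =====
-- shared helper: Python's nested is_part_of_multiplication (indexing guarded, so getD is exact)
def pvIsMult (tokens : List String) (index : Nat) : Bool :=
  (decide (0 < index) && (tokens.getD (index - 1) "" == "*")) ||
  (decide (index + 1 < tokens.length) && (tokens.getD (index + 1) "" == "*"))

-- A's inner `for j in range(i+2, len(tokens))` search
def pvAFindOpp (tokens : List String) (opp t : String) : List Nat → Option Nat
  | [] => none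
  | j :: js =>
      if tokens.getD j "" == opp && decide (j + 1 < tokens.length) &&
         tokens.getD (j + 1) "" == t && !(pvIsMult tokens (j + 1)) then some j
      else pvAFindOpp tokens opp t js

-- A's two-step removal: tokens[:j]+tokens[j+2:], then new[:i]+new[i+2:]
def pvARemove (tokens : List String) (i j : Nat) : List String :=
  let nt := tokens.take j ++ tokens.drop (j + 2)
  nt.take i ++ nt.drop (i + 2)

-- A's first two loops are textually identical up to the sign pair (sgn, opp): one helper, called twice
def pvASweep (tokens : List String) (sgn opp : String) : List Nat → Option (List String)
  | [] => none
  | i :: is =>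
      if tokens.getD i "" == sgn && decide (i + 1 < tokens.length) then
        if pvIsMult tokens (i + 1) then pvASweep tokens sgn opp is
        else
          match pvAFindOpp tokens opp (tokens.getD (i + 1) "")
              (List.range' (i + 2) (tokens.length - (i + 2))) with
          | some j => some (pvARemove tokens i j)
          | none => pvASweep tokens sgn opp is
      else pvASweep tokens sgn opp is

-- A's third loop (`for i in range(1, len(tokens))`)
def pvAPhase3 (tokens : List String) (t0 : String) : List Nat → Option (List String)
  | [] => none
  | i :: is =>
      if decide (i + 1 < tokens.length) && tokens.getD i "" == "-" &&
         tokens.getD (i + 1) "" == t0 && !(pvIsMult tokens (i + 1)) then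
        some ((tokens.take i).drop 1 ++ tokens.drop (i + 2))
      else pvAPhase3 tokens t0 is

def apply_cancel (tokens : List String) : Option (List String) :=
  match pvASweep tokens "+" "-" (List.range tokens.length) with
  | some r => some r
  | none =>
    match pvASweep tokens "-" "+" (List.range tokens.length) with
    | some r => some r
    | none =>
      if decide (3 ≤ tokens.length) &&
         !(tokens.getD 0 "" == "+" || tokens.getD 0 "" == "-") && !(pvIsMult tokens 0) then
        pvAPhase3 tokens (tokens.getD 0 "") (List.range' 1 (tokens.length - 1))
      else none

-- ===== PORT B =====
-- one indexing pass: ordered (pos, term) occurrence lists and term → ascending positions dicts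
-- (Python's d.setdefault(t, []).append(p) is d.modify t [] (· ++ [p]))
def pvBStep (tokens : List String)
    (s : List (Nat × String) × List (Nat × String) ×
      PySem.Dict String (List Nat) × PySem.Dict String (List Nat)) (p : Nat) :
    List (Nat × String) × List (Nat × String) ×
      PySem.Dict String (List Nat) × PySem.Dict String (List Nat) :=
  if !(pvIsMult tokens (p + 1)) then
    if tokens.getD p "" == "+" then
      (s.1 ++ [(p, tokens.getD (p + 1) "")], s.2.1,
       s.2.2.1.modify (tokens.getD (p + 1) "") [] (· ++ [p]), s.2.2.2)
    else if tokens.getD p "" == "-" then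
      (s.1, s.2.1 ++ [(p, tokens.getD (p + 1) "")], s.2.2.1,
       s.2.2.2.modify (tokens.getD (p + 1) "") [] (· ++ [p]))
    else s
  else s

def pvBIndex (tokens : List String) :
    List (Nat × String) × List (Nat × String) ×
      PySem.Dict String (List Nat) × PySem.Dict String (List Nat) :=
  (List.range (tokens.length - 1)).foldl (pvBStep tokens)
    ([], [], PySem.Dict.empty, PySem.Dict.empty)

-- bisect.bisect_left, ported by its contract on the ascending lists B feeds it
def pvBisectLeft (js : List Nat) (x : Nat) : Nat :=
  (js.takeWhile (fun j => decide (j < x))).length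

-- one-shot removal of the two pairs at i and j (i+2 ≤ j): tokens[:i]+tokens[i+2:j]+tokens[j+2:]
def pvBCut (tokens : List String) (i j : Nat) : List String :=
  tokens.take i ++ ((tokens.take j).drop (i + 2)) ++ tokens.drop (j + 2)

def pvBPhase (tokens : List String) (opp : PySem.Dict String (List Nat)) :
    List (Nat × String) → Option (List String)
  | [] => none
  | (i, t) :: rest =>
      let js := opp.getD t []
      match js[pvBisectLeft js (i + 2)]? with
      | some j => some (pvBCut tokens i j)
      | none => pvBPhase tokens opp rest

def apply_cancel_alt (tokens : List String) : Option (List String) :=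
  let s := pvBIndex tokens
  match pvBPhase tokens s.2.2.2 s.1 with
  | some r => some r
  | none =>
    match pvBPhase tokens s.2.2.1 s.2.1 with
    | some r => some r
    | none =>
      if decide (3 ≤ tokens.length) &&
         !(tokens.getD 0 "" == "+" || tokens.getD 0 "" == "-") && !(pvIsMult tokens 0) then
        match (s.2.2.2.getD (tokens.getD 0 "") []).head? with
        | some j => some ((tokens.take j).drop 1 ++ tokens.drop (j + 2))
        | none => none
      else none

-- ===== PRECONDITION & SPEC =====
def Spec_apply_cancel (tokens : List String) (out : Option (List String)) : Prop := out = apply_cancel_alt tokens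
instance (tokens : List String) (out : Option (List String)) : Decidable (Spec_apply_cancel tokens out) := by unfold Spec_apply_cancel; infer_instance

-- ===== CLAIM (what is proved, stated in full; the proofs are below) =====
def Claim_equal_apply_cancel : Prop := ∀ (tokens : List String), Dom_apply_cancel tokens → Spec_apply_cancel tokens (apply_cancel tokens)

-- ===== LEMMAS AND PROOFS =====

-- selection predicate of B's indexing pass for a sign
def pvSel (tokens : List String) (sgn : String) (p : Nat) : Bool :=
  !(pvIsMult tokens (p + 1)) && (tokens.getD p "" == sgn)

-- ascending positions of sign `sgn` immediately followed by term `t` (not under `*`)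
def pvPosList (tokens : List String) (sgn t : String) : List Nat :=
  (List.range (tokens.length - 1)).filter
    (fun p => pvSel tokens sgn p && (tokens.getD (p + 1) "" == t))

def pvOccList (tokens : List String) (sgn : String) : List (Nat × String) :=
  ((List.range (tokens.length - 1)).filter (pvSel tokens sgn)).map
    (fun p => (p, tokens.getD (p + 1) ""))

-- A's inner-loop condition, literally
def pvFull (tokens : List String) (opp t : String) (j : Nat) : Bool :=
  tokens.getD j "" == opp && decide (j + 1 < tokens.length) &&
    tokens.getD (j + 1) "" == t && !(pvIsMult tokens (j + 1))

-- the slot A's outer loop accepts at index i (for sign `sgn`)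
def pvSlot (tokens : List String) (sgn : String) (i : Nat) : Option (Nat × String) :=
  if tokens.getD i "" == sgn && decide (i + 1 < tokens.length) && !(pvIsMult tokens (i + 1))
  then some (i, tokens.getD (i + 1) "") else none

theorem pvBIndex_fold_occ_plus (tokens : List String) (l : List Nat) (s) :
    (l.foldl (pvBStep tokens) s).1 =
      s.1 ++ (l.filter (pvSel tokens "+")).map (fun p => (p, tokens.getD (p + 1) "")) := by
  induction l generalizing s with
  | nil => simp
  | cons p l ih =>
      simp only [List.foldl_cons, ih, List.filter_cons]
      unfold pvBStep pvSel
      by_cases hm : pvIsMult tokens (p + 1) <;>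
        by_cases hp : tokens.getD p "" == "+" <;>
        by_cases hn : tokens.getD p "" == "-" <;>
        simp_all

theorem pvBIndex_fold_occ_minus (tokens : List String) (l : List Nat) (s) :
    (l.foldl (pvBStep tokens) s).2.1 =
      s.2.1 ++ (l.filter (pvSel tokens "-")).map (fun p => (p, tokens.getD (p + 1) "")) := by
  induction l generalizing s with
  | nil => simp
  | cons p l ih =>
      simp only [List.foldl_cons, ih, List.filter_cons]
      unfold pvBStep pvSel
      by_cases hm : pvIsMult tokens (p + 1) <;>
        by_cases hp : tokens.getD p "" == "+" <;>
        by_cases hn : tokens.getD p "" == "-" <;>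
        simp_all

set_option maxHeartbeats 1600000 in
theorem pvBIndex_fold_pos_plus (tokens : List String) (l : List Nat) (s) (t : String) :
    ((l.foldl (pvBStep tokens) s).2.2.1).getD t [] =
      (s.2.2.1).getD t [] ++
        l.filter (fun p => pvSel tokens "+" p && (tokens.getD (p + 1) "" == t)) := by
  induction l generalizing s with
  | nil => simp
  | cons p l ih =>
      simp only [List.foldl_cons, ih, List.filter_cons]
      unfold pvBStep pvSel
      by_cases hm : pvIsMult tokens (p + 1) <;>
        by_cases hp : tokens.getD p "" == "+" <;>
        by_cases hn : tokens.getD p "" == "-" <;>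
        by_cases ht : t = tokens.getD (p + 1) "" <;>
        simp_all [PySem.Dict.getD_modify] <;>
        exact fun hh => ht hh.symm

set_option maxHeartbeats 1600000 in
theorem pvBIndex_fold_pos_minus (tokens : List String) (l : List Nat) (s) (t : String) :
    ((l.foldl (pvBStep tokens) s).2.2.2).getD t [] =
      (s.2.2.2).getD t [] ++
        l.filter (fun p => pvSel tokens "-" p && (tokens.getD (p + 1) "" == t)) := by
  induction l generalizing s with
  | nil => simp
  | cons p l ih =>
      simp only [List.foldl_cons, ih, List.filter_cons]
      unfold pvBStep pvSel
      by_cases hm : pvIsMult tokens (p + 1) <;>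
        by_cases hp : tokens.getD p "" == "+" <;>
        by_cases hn : tokens.getD p "" == "-" <;>
        by_cases ht : t = tokens.getD (p + 1) "" <;>
        simp_all [PySem.Dict.getD_modify] <;>
        exact fun hh => ht hh.symm

theorem pvBIndex_occ_plus (tokens : List String) :
    (pvBIndex tokens).1 = pvOccList tokens "+" := by
  simp [pvBIndex, pvOccList, pvBIndex_fold_occ_plus]

theorem pvBIndex_occ_minus (tokens : List String) :
    (pvBIndex tokens).2.1 = pvOccList tokens "-" := by
  simp [pvBIndex, pvOccList, pvBIndex_fold_occ_minus]

theorem pvBIndex_pos_plus (tokens : List String) (t : String) :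
    ((pvBIndex tokens).2.2.1).getD t [] = pvPosList tokens "+" t := by
  simp [pvBIndex, pvPosList, pvBIndex_fold_pos_plus]

theorem pvBIndex_pos_minus (tokens : List String) (t : String) :
    ((pvBIndex tokens).2.2.2).getD t [] = pvPosList tokens "-" t := by
  simp [pvBIndex, pvPosList, pvBIndex_fold_pos_minus]

-- A's inner scan is head-of-filter
theorem pvAFindOpp_eq (tokens : List String) (opp t : String) (l : List Nat) :
    pvAFindOpp tokens opp t l = (l.filter (pvFull tokens opp t)).head? := by
  induction l with
  | nil => rfl
  | cons j l ih =>
      unfold pvAFindOpp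
      by_cases h : pvFull tokens opp t j = true
      · rw [if_pos (by simpa only [pvFull] using h), List.filter_cons_of_pos h]
        rfl
      · rw [if_neg (by simpa only [pvFull] using h), List.filter_cons_of_neg h]
        exact ih

-- positions lists are strictly ascending
theorem pvPosList_sorted (tokens : List String) (sgn t : String) :
    (pvPosList tokens sgn t).Pairwise (· < ·) := by
  exact List.Pairwise.sublist List.filter_sublist List.pairwise_lt_range

-- on an ascending list, dropping the prefix < x is filtering ≥ x
theorem dropWhile_lt_eq_filter_le (js : List Nat) (x : Nat) (h : js.Pairwise (· < ·)) :
    js.dropWhile (fun j => decide (j < x)) = js.filter (fun j => decide (x ≤ j)) := by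
  induction js with
  | nil => rfl
  | cons a js ih =>
      rcases List.pairwise_cons.mp h with ⟨ha, hjs⟩
      by_cases hax : a < x
      · simp [hax, Nat.not_le.mpr hax, ih hjs]
      · rw [Nat.not_lt] at hax
        rw [List.dropWhile_cons]
        simp only [decide_eq_true_eq]
        rw [List.filter_cons]
        simp only [hax, decide_true, if_true]
        simp only [Nat.not_lt.mpr hax]
        rw [List.filter_eq_self.mpr fun b hb => by
          simpa using Nat.le_of_lt (Nat.lt_of_le_of_lt hax (ha b hb))]
        simp

-- B's bisect lookup is head-of-filter on an ascending list
theorem bisect_lookup (js : List Nat) (x : Nat) (h : js.Pairwise (· < ·)) :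
    js[pvBisectLeft js x]? = (js.filter (fun j => decide (x ≤ j))).head? := by
  unfold pvBisectLeft
  set k := (js.takeWhile (fun j => decide (j < x))).length with hk
  conv_lhs => rw [← List.takeWhile_append_dropWhile (p := fun j => decide (j < x)) (l := js)]
  rw [List.getElem?_append_right (by rw [hk])]
  rw [hk]
  simp [dropWhile_lt_eq_filter_le js x h, List.head?_eq_getElem?]

-- helper: filterMap of an if-option is map-of-filter
theorem filterMap_slot (tokens : List String) (sgn : String) (l : List Nat) :
    l.filterMap (pvSlot tokens sgn) =
      (l.filter (fun i => tokens.getD i "" == sgn && decide (i + 1 < tokens.length) &&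
          !(pvIsMult tokens (i + 1)))).map (fun i => (i, tokens.getD (i + 1) "")) := by
  induction l with
  | nil => rfl
  | cons i l ih =>
      rw [List.filterMap_cons]
      cases h : (tokens.getD i "" == sgn && decide (i + 1 < tokens.length) &&
          !(pvIsMult tokens (i + 1))) with
      | true =>
          have hs : pvSlot tokens sgn i = some (i, tokens.getD (i + 1) "") := by
            unfold pvSlot
            rw [if_pos h]
          rw [hs]
          simp only [List.filter_cons, h, if_true, List.map_cons]
          simp [ih]
      | false =>
          have hs : pvSlot tokens sgn i = none := by
            unfold pvSlot
            rw [if_neg (by simp only [h]; simp)]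
          rw [hs]
          simp only [List.filter_cons, h]
          simpa using ih

-- A's outer-loop slots over range n are B's occurrence list
theorem occList_eq_filterMap (tokens : List String) (sgn : String) :
    (List.range tokens.length).filterMap (pvSlot tokens sgn) = pvOccList tokens sgn := by
  rw [filterMap_slot]
  unfold pvOccList
  congr 1
  rcases Nat.eq_zero_or_pos tokens.length with h0 | hpos
  · simp [h0]
  · have hsplit : List.range tokens.length =
        List.range (tokens.length - 1) ++ [tokens.length - 1] := by
      conv_lhs => rw [show tokens.length = (tokens.length - 1) + 1 by omega]
      rw [List.range_succ]
    rw [hsplit, List.filter_append]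
    have hlast : List.filter (fun i => tokens.getD i "" == sgn &&
        decide (i + 1 < tokens.length) && !(pvIsMult tokens (i + 1))) [tokens.length - 1] = [] := by
      have hd : (decide (tokens.length - 1 + 1 < tokens.length)) = false := by
        simp; omega
      simp [hd]
    rw [hlast, List.append_nil]
    apply List.filter_congr
    intro i hi
    have hi' : i < tokens.length - 1 := List.mem_range.mp hi
    have hd : (decide (i + 1 < tokens.length)) = true := by simp; omega
    unfold pvSel
    rw [hd]
    cases tokens.getD i "" == sgn <;> cases pvIsMult tokens (i + 1) <;> simp

-- both inner searches reduce to the same head-of-filter over range n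
theorem range_filter_G (tokens : List String) (opp t : String) (i : Nat) :
    (List.range' (i + 2) (tokens.length - (i + 2))).filter (pvFull tokens opp t) =
      (List.range tokens.length).filter
        (fun j => pvFull tokens opp t j && decide (i + 2 ≤ j)) := by
  by_cases hn : i + 2 ≤ tokens.length
  · have hsplit : List.range tokens.length =
        List.range' 0 (i + 2) ++ List.range' (i + 2) (tokens.length - (i + 2)) := by
      rw [List.range_eq_range']
      have := List.range'_append (s := 0) (m := i + 2) (n := tokens.length - (i + 2)) (step := 1)
      simp only [Nat.zero_add, Nat.one_mul] at this
      rw [show tokens.length = i + 2 + (tokens.length - (i + 2)) by omega, ← this]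
      congr 2
      omega
    rw [hsplit, List.filter_append]
    have h1 : (List.range' 0 (i + 2)).filter
        (fun j => pvFull tokens opp t j && decide (i + 2 ≤ j)) = [] := by
      rw [List.filter_eq_nil_iff]
      intro a ha
      have hlt : a < i + 2 := by
        rcases List.mem_range'.mp ha with ⟨k, hk, rfl⟩; omega
      simp [Nat.not_le.mpr hlt]
    rw [h1, List.nil_append]
    apply List.filter_congr
    intro a ha
    have hle : i + 2 ≤ a := by
      rcases List.mem_range'.mp ha with ⟨k, hk, rfl⟩; omega
    simp [hle]
  · have h0 : tokens.length - (i + 2) = 0 := by omega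
    rw [h0]
    rw [List.range'_zero, List.filter_nil]
    symm
    rw [List.filter_eq_nil_iff]
    intro a ha
    have hlt : a < tokens.length := List.mem_range.mp ha
    have : ¬ (i + 2 ≤ a) := by omega
    simp [this]

theorem posfilter_eq (tokens : List String) (opp t : String) (i : Nat) :
    (pvPosList tokens opp t).filter (fun j => decide (i + 2 ≤ j)) =
      (List.range tokens.length).filter
        (fun j => pvFull tokens opp t j && decide (i + 2 ≤ j)) := by
  unfold pvPosList
  rw [List.filter_filter]
  rcases Nat.eq_zero_or_pos tokens.length with h0 | hpos
  · simp [h0]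
  · have hsplit : List.range tokens.length =
        List.range (tokens.length - 1) ++ [tokens.length - 1] := by
      conv_lhs => rw [show tokens.length = (tokens.length - 1) + 1 by omega]
      rw [List.range_succ]
    conv_rhs => rw [hsplit]
    rw [List.filter_append]
    have hfull : pvFull tokens opp t (tokens.length - 1) = false := by
      unfold pvFull
      have hd : (decide (tokens.length - 1 + 1 < tokens.length)) = false := by
        simp; omega
      rw [hd]
      simp
    have hlast : List.filter (fun j => pvFull tokens opp t j && decide (i + 2 ≤ j))
        [tokens.length - 1] = [] := by simp [hfull]
    rw [hlast, List.append_nil]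
    apply List.filter_congr
    intro a ha
    have ha' : a < tokens.length - 1 := List.mem_range.mp ha
    have hd : (decide (a + 1 < tokens.length)) = true := by simp; omega
    unfold pvFull pvSel
    rw [hd]
    cases tokens.getD a "" == opp <;> cases tokens.getD (a + 1) "" == t <;>
      cases pvIsMult tokens (a + 1) <;> cases decide (i + 2 ≤ a) <;> simp

-- A's inner search equals B's head-of-filter on the indexed positions
theorem inner_eq (tokens : List String) (opp t : String) (i : Nat) :
    pvAFindOpp tokens opp t
        (List.range' (i + 2) (tokens.length - (i + 2))) =
      ((pvPosList tokens opp t).filter (fun j => decide (i + 2 ≤ j))).head? := by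
  rw [pvAFindOpp_eq, range_filter_G, ← posfilter_eq]

-- the two removals agree on in-range pairs
theorem remove_eq_cut (tokens : List String) (i j : Nat) (hij : i + 2 ≤ j)
    (hj : j + 1 < tokens.length) : pvARemove tokens i j = pvBCut tokens i j := by
  simp only [pvARemove, pvBCut]
  have hjlen : (tokens.take j).length = j := by
    simp; omega
  rw [List.take_append, List.drop_append, hjlen]
  have h1 : i - j = 0 := by omega
  have h2 : i + 2 - j = 0 := by omega
  rw [h1, h2]
  simp [List.take_take, Nat.min_eq_left (by omega : i ≤ j)]

-- A's sweep equals B's phase over the corresponding occurrence list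
theorem pvBPhase_cons (tokens : List String) (D : PySem.Dict String (List Nat))
    (i : Nat) (t : String) (rest : List (Nat × String)) :
    pvBPhase tokens D ((i, t) :: rest) =
      match (D.getD t [])[pvBisectLeft (D.getD t []) (i + 2)]? with
      | some j => some (pvBCut tokens i j)
      | none => pvBPhase tokens D rest := rfl

theorem sweep_eq (tokens : List String) (sgn opp : String)
    (D : PySem.Dict String (List Nat))
    (hD : ∀ t, D.getD t [] = pvPosList tokens opp t) (l : List Nat) :
    pvASweep tokens sgn opp l = pvBPhase tokens D (l.filterMap (pvSlot tokens sgn)) := by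
  induction l with
  | nil => rfl
  | cons i l ih =>
      rw [List.filterMap_cons]
      unfold pvASweep
      cases h1 : (tokens.getD i "" == sgn && decide (i + 1 < tokens.length)) with
      | false =>
          rw [if_neg (by simp)]
          have hs : pvSlot tokens sgn i = none := by
            unfold pvSlot
            rw [if_neg (by simp only [h1, Bool.false_and]; simp)]
          rw [hs]
          exact ih
      | true =>
          rw [if_pos rfl]
          cases hm : pvIsMult tokens (i + 1) with
          | true =>
              rw [if_pos rfl]
              have hs : pvSlot tokens sgn i = none := by
                unfold pvSlot
                rw [if_neg (by simp only [h1, hm]; simp)]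
              rw [hs]
              exact ih
          | false =>
              rw [if_neg (by simp)]
              have hs : pvSlot tokens sgn i = some (i, tokens.getD (i + 1) "") := by
                unfold pvSlot
                rw [if_pos (by simp only [h1, hm]; simp)]
              rw [hs, pvBPhase_cons, hD, bisect_lookup _ _ (pvPosList_sorted tokens opp _),
                inner_eq tokens opp (tokens.getD (i + 1) "") i]
              cases hj : ((pvPosList tokens opp (tokens.getD (i + 1) "")).filter
                  (fun j => decide (i + 2 ≤ j))).head? with
              | none => exact ih
              | some j =>
                  have hjmem : j ∈ (pvPosList tokens opp (tokens.getD (i + 1) "")).filter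
                      (fun j => decide (i + 2 ≤ j)) := by
                    rcases List.head?_eq_some_iff.mp hj with ⟨tl, htl⟩
                    rw [htl]
                    exact List.mem_cons_self
                  rcases List.mem_filter.mp hjmem with ⟨hpos, hge⟩
                  have hge' : i + 2 ≤ j := by simpa using hge
                  have hjn : j < tokens.length - 1 := by
                    unfold pvPosList at hpos
                    exact List.mem_range.mp (List.mem_filter.mp hpos).1
                  simp only [remove_eq_cut tokens i j hge' (by omega : j + 1 < tokens.length)]

-- A's third loop is head-of-filter, mapped
theorem phase3_loop_eq (tokens : List String) (t0 : String) (l : List Nat) :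
    pvAPhase3 tokens t0 l =
      ((l.filter (fun i => decide (i + 1 < tokens.length) && tokens.getD i "" == "-" &&
          tokens.getD (i + 1) "" == t0 && !(pvIsMult tokens (i + 1)))).head?).map
        (fun i => (tokens.take i).drop 1 ++ tokens.drop (i + 2)) := by
  induction l with
  | nil => rfl
  | cons i l ih =>
      unfold pvAPhase3
      cases h : (decide (i + 1 < tokens.length) && tokens.getD i "" == "-" &&
          tokens.getD (i + 1) "" == t0 && !(pvIsMult tokens (i + 1))) with
      | true =>
          rw [if_pos rfl]
          simp only [List.filter_cons, h, if_true]
          rfl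
      | false =>
          rw [if_neg (by simp)]
          simp only [List.filter_cons, h]
          rw [if_neg (by simp)]
          exact ih

theorem phase3_eq (tokens : List String)
    (h0 : (tokens.getD 0 "" == "+" || tokens.getD 0 "" == "-") = false)
    (h3 : 3 ≤ tokens.length) :
    pvAPhase3 tokens (tokens.getD 0 "") (List.range' 1 (tokens.length - 1)) =
      match (pvPosList tokens "-" (tokens.getD 0 "")).head? with
      | some j => some ((tokens.take j).drop 1 ++ tokens.drop (j + 2))
      | none => none := by
  rw [phase3_loop_eq]
  have h0b : (tokens.getD 0 "" == "-") = false := by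
    cases hb : tokens.getD 0 "" == "-"
    · rfl
    · rw [hb] at h0; simp at h0
  have key : (List.range' 1 (tokens.length - 1)).filter
      (fun i => decide (i + 1 < tokens.length) && tokens.getD i "" == "-" &&
        tokens.getD (i + 1) "" == tokens.getD 0 "" && !(pvIsMult tokens (i + 1))) =
      pvPosList tokens "-" (tokens.getD 0 "") := by
    have hsplit0 : List.range tokens.length = 0 :: List.range' 1 (tokens.length - 1) := by
      rw [show tokens.length = tokens.length - 1 + 1 by omega]
      simp only [Nat.add_sub_cancel]
      rw [List.range_eq_range', List.range'_succ]
    have hstep : (List.range' 1 (tokens.length - 1)).filter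
        (fun i => decide (i + 1 < tokens.length) && tokens.getD i "" == "-" &&
          tokens.getD (i + 1) "" == tokens.getD 0 "" && !(pvIsMult tokens (i + 1))) =
        (List.range tokens.length).filter
        (fun i => decide (i + 1 < tokens.length) && tokens.getD i "" == "-" &&
          tokens.getD (i + 1) "" == tokens.getD 0 "" && !(pvIsMult tokens (i + 1))) := by
      have h0b' : ¬ (tokens.getD 0 "" = "-") := by simpa using h0b
      rw [hsplit0, List.filter_cons]
      simp
      intro _ hc
      exact absurd hc h0b' 
    rw [hstep]
    unfold pvPosList
    have hsplit1 : List.range tokens.length =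
        List.range (tokens.length - 1) ++ [tokens.length - 1] := by
      conv_lhs => rw [show tokens.length = (tokens.length - 1) + 1 by omega]
      rw [List.range_succ]
    conv_lhs => rw [hsplit1]
    rw [List.filter_append]
    have hd : (decide (tokens.length - 1 + 1 < tokens.length)) = false := by
      simp; omega
    have hlast : List.filter
        (fun i => decide (i + 1 < tokens.length) && tokens.getD i "" == "-" &&
          tokens.getD (i + 1) "" == tokens.getD 0 "" && !(pvIsMult tokens (i + 1)))
        [tokens.length - 1] = [] := by
      simp only [List.filter_cons, List.filter_nil, hd, Bool.false_and]
      rfl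
    rw [hlast, List.append_nil]
    apply List.filter_congr
    intro a ha
    have ha' : a < tokens.length - 1 := List.mem_range.mp ha
    have hda : (decide (a + 1 < tokens.length)) = true := by simp; omega
    unfold pvSel
    rw [hda]
    cases tokens.getD a "" == "-" <;>
      cases tokens.getD (a + 1) "" == tokens.getD 0 "" <;>
      cases pvIsMult tokens (a + 1) <;> simp
  rw [key]
  cases (pvPosList tokens "-" (tokens.getD 0 "")).head? <;> rfl

-- ===== VERDICT (by name: the statement is the Claim_ definition above) =====
theorem apply_cancel_spec : Claim_equal_apply_cancel := by
  unfold Claim_equal_apply_cancel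
  intro tokens _
  unfold Spec_apply_cancel
  simp only [apply_cancel, apply_cancel_alt]
  rw [pvBIndex_occ_plus, pvBIndex_occ_minus, ← occList_eq_filterMap, ← occList_eq_filterMap,
    ← sweep_eq tokens "+" "-" ((pvBIndex tokens).2.2.2) (pvBIndex_pos_minus tokens),
    ← sweep_eq tokens "-" "+" ((pvBIndex tokens).2.2.1) (pvBIndex_pos_plus tokens)]
  cases pvASweep tokens "+" "-" (List.range tokens.length) with
  | some r => rfl
  | none =>
      cases pvASweep tokens "-" "+" (List.range tokens.length) with
      | some r => rfl
      | none =>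
          cases hg : (decide (3 ≤ tokens.length) &&
              !(tokens.getD 0 "" == "+" || tokens.getD 0 "" == "-") && !(pvIsMult tokens 0)) with
          | false => rw [if_neg (by simp), if_neg (by simp)]
          | true =>
              rw [if_pos rfl, if_pos rfl, pvBIndex_pos_minus]
              rcases (Bool.and_eq_true _ _).mp hg with ⟨hab, hc⟩
              rcases (Bool.and_eq_true _ _).mp hab with ⟨ha, hb⟩
              have h3 : 3 ≤ tokens.length := by simpa using ha
              have h0 : (tokens.getD 0 "" == "+" || tokens.getD 0 "" == "-") = false := by
                revert hb
                cases (tokens.getD 0 "" == "+" || tokens.getD 0 "" == "-") <;> simp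
              rw [phase3_eq tokens h0 h3]
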